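-- pv_equiv track=rewrite | github.com/jandolezal/advent-of-code-2021 | day_09/another_smoke_basin.py | gather_heights
-- ===== SOURCE A (Python) =====
-- def all_neighbours_are_higher(row, col, heightmap):
--     rows = len(heightmap)
--     cols = len(heightmap[0])
--
--     maybe = [(row - 1, col), (row + 1, col), (row, col - 1), (row, col + 1)]
--     # Filter out illegal indices
--     allowed_indices = [(row, col) for row, col in maybe if (row >= 0) and (row < rows) and (col >= 0) and (col < cols)]
--
--     for adjacent_row, adjacent_col in allowed_indices:
--         if heightmap[row][col] >= heightmap[adjacent_row][adjacent_col]: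
--             return False
--     return True
--
-- def gather_heights(heightmap):
--     rows = len(heightmap)
--     cols = len(heightmap[0])
--
--     heights = []
--
--     for row in range(rows):
--         for col in range(cols):
--             if all_neighbours_are_higher(row, col, heightmap):
--                 heights.append(heightmap[row][col])
--
--     return heights
-- ===== SOURCE B (Python) =====
-- def gather_heights(heightmap):
--     rows = len(heightmap)
--     cols = len(heightmap[0])
--
--     disqualified = set()
--     for row in range(rows):
--         for col in range(cols):
--             if col + 1 < cols:
--                 a = heightmap[row][col]
--                 b = heightmap[row][col + 1]
--                 if a >= b:
--                     disqualified.add((row, col))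
--                 if b >= a:
--                     disqualified.add((row, col + 1))
--             if row + 1 < rows:
--                 a = heightmap[row][col]
--                 b = heightmap[row + 1][col]
--                 if a >= b:
--                     disqualified.add((row, col))
--                 if b >= a:
--                     disqualified.add((row + 1, col))
--
--     return [heightmap[row][col]
--             for row in range(rows)
--             for col in range(cols)
--             if (row, col) not in disqualified]
-- ===== Notes on version B (the rewrite author's own statement) =====
-- stated objective: alternative
-- what changed: Instead of re-scanning all four neighbours for every cell, B makes a single pass over the adjacent (right/down) pairs to build a 'disqualified' set (>= disqualifies, a tie disqualifies both) and then collects the cells not in the set in row-major order.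
-- outside the precondition, e.g. on gather_heights([]): A raises IndexError, B raises IndexError; on gather_heights([[1, 2], [3]]): A raises IndexError, B raises IndexError
import Mathlib
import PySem

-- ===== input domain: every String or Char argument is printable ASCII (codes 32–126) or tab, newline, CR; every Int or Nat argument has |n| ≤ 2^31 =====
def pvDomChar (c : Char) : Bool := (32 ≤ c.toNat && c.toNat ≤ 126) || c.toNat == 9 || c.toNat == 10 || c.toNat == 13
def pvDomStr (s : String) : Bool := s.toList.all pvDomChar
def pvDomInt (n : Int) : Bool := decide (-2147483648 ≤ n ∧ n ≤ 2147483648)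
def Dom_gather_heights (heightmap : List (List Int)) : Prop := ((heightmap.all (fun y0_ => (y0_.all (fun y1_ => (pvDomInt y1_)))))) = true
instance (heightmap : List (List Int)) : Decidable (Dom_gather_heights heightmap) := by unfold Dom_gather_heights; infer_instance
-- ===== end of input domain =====

-- B replaces the per-cell four-neighbour scan by a single pass over adjacent (right/down)
-- pairs that builds a `disqualified` set, then collects the undisqualified cells (objective:
-- alternative decomposition; each adjacency is inspected once instead of twice).

-- ===== PORT A =====
-- heightmap[row][col] (indices always in range under Pre_; default values never reached there)
def pvCell (heightmap : List (List Int)) (row col : Int) : Int :=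
  PySem.List.pyGetD (PySem.List.pyGetD heightmap row []) col 0

def all_neighbours_are_higher (row col : Int) (heightmap : List (List Int)) : Bool :=
  let rows : Int := heightmap.length
  let cols : Int := (PySem.List.pyGetD heightmap 0 []).length
  let maybe : List (Int × Int) := [(row - 1, col), (row + 1, col), (row, col - 1), (row, col + 1)]
  let allowed := maybe.filter (fun p =>
    decide (0 ≤ p.1) && decide (p.1 < rows) && decide (0 ≤ p.2) && decide (p.2 < cols))
  -- 'for …: if cell ≥ neighbour: return False / return True' = no adjacent cell is ≤ the cell
  allowed.all (fun p => !(decide (pvCell heightmap row col ≥ pvCell heightmap p.1 p.2)))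

def gather_heights (heightmap : List (List Int)) : List Int :=
  let rows := heightmap.length
  let cols := (PySem.List.pyGetD heightmap 0 []).length
  (List.range rows).foldl (fun heights (row : Nat) =>
    (List.range cols).foldl (fun heights (col : Nat) =>
      if all_neighbours_are_higher (row : Int) (col : Int) heightmap then
        heights ++ [pvCell heightmap (row : Int) (col : Int)]
      else heights) heights) []

-- ===== PORT B =====
-- heightmap[row][col] with the nonnegative indices B uses
def pvCellN (heightmap : List (List Int)) (row col : Nat) : Int :=
  (heightmap.getD row []).getD col 0

-- loop body of B's pair scan at cell (row, col)
def pvDisqStep (heightmap : List (List Int)) (rows cols : Nat)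
    (disq : PySem.Set (Nat × Nat)) (row col : Nat) : PySem.Set (Nat × Nat) :=
  let disq :=
    if col + 1 < cols then
      let a := pvCellN heightmap row col
      let b := pvCellN heightmap row (col + 1)
      let disq := if a ≥ b then PySem.Set.add disq (row, col) else disq
      if b ≥ a then PySem.Set.add disq (row, col + 1) else disq
    else disq
  if row + 1 < rows then
    let a := pvCellN heightmap row col
    let b := pvCellN heightmap (row + 1) col
    let disq := if a ≥ b then PySem.Set.add disq (row, col) else disq
    if b ≥ a then PySem.Set.add disq (row + 1, col) else disq
  else disq

def gather_heights_alt (heightmap : List (List Int)) : List Int :=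
  let rows := heightmap.length
  let cols := (heightmap.getD 0 []).length
  let disq : PySem.Set (Nat × Nat) :=
    (List.range rows).foldl (fun disq row =>
      (List.range cols).foldl (fun disq col => pvDisqStep heightmap rows cols disq row col) disq)
      PySem.Set.empty
  (List.range rows).foldl (fun heights row =>
    (List.range cols).foldl (fun heights col =>
      if (row, col) ∈ disq then heights
      else heights ++ [pvCellN heightmap row col]) heights) []

-- ===== PRECONDITION & SPEC =====
-- Pre_ excludes exactly the inputs where Python A raises IndexError: the empty heightmap
-- (heightmap[0]) and ragged maps with a row shorter than row 0 (heightmap[row][col], col < cols).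
def Pre_gather_heights (heightmap : List (List Int)) : Prop :=
  heightmap ≠ [] ∧ ∀ r ∈ heightmap, (heightmap.headD []).length ≤ r.length

instance (heightmap : List (List Int)) : Decidable (Pre_gather_heights heightmap) := by
  unfold Pre_gather_heights; infer_instance

def pvWitness_gather_heights : List (List Int) := [[1, 2], [3, 0]]

def Spec_gather_heights (heightmap : List (List Int)) (out : List Int) : Prop := out = gather_heights_alt heightmap
instance (heightmap : List (List Int)) (out : List Int) : Decidable (Spec_gather_heights heightmap out) := by unfold Spec_gather_heights; infer_instance

-- ===== CLAIM (what is proved, stated in full; the proofs are below) =====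
def Claim_equal_gather_heights : Prop := ∀ (heightmap : List (List Int)), Dom_gather_heights heightmap → Pre_gather_heights heightmap → Spec_gather_heights heightmap (gather_heights heightmap)

-- ===== LEMMAS AND PROOFS =====

-- x is added by B's loop body at cell (row, col)
def pvCellAdd (heightmap : List (List Int)) (rows cols : Nat) (rc : Nat × Nat) (x : Nat × Nat) : Prop :=
  (rc.2 + 1 < cols ∧
    ((pvCellN heightmap rc.1 rc.2 ≥ pvCellN heightmap rc.1 (rc.2 + 1) ∧ x = (rc.1, rc.2)) ∨
     (pvCellN heightmap rc.1 (rc.2 + 1) ≥ pvCellN heightmap rc.1 rc.2 ∧ x = (rc.1, rc.2 + 1)))) ∨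
  (rc.1 + 1 < rows ∧
    ((pvCellN heightmap rc.1 rc.2 ≥ pvCellN heightmap (rc.1 + 1) rc.2 ∧ x = (rc.1, rc.2)) ∨
     (pvCellN heightmap (rc.1 + 1) rc.2 ≥ pvCellN heightmap rc.1 rc.2 ∧ x = (rc.1 + 1, rc.2))))

-- (r, c) is disqualified: some in-bounds neighbour is ≤ it
def pvDisqP (heightmap : List (List Int)) (rows cols r c : Nat) : Prop :=
  (c + 1 < cols ∧ pvCellN heightmap r c ≥ pvCellN heightmap r (c + 1)) ∨
  (0 < c ∧ pvCellN heightmap r c ≥ pvCellN heightmap r (c - 1)) ∨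
  (r + 1 < rows ∧ pvCellN heightmap r c ≥ pvCellN heightmap (r + 1) c) ∨
  (0 < r ∧ pvCellN heightmap r c ≥ pvCellN heightmap (r - 1) c)

lemma mem_foldl_step {β γ : Type} (step : List γ → β → List γ) (Add : β → γ → Prop)
    (hstep : ∀ s i x, x ∈ step s i ↔ x ∈ s ∨ Add i x) :
    ∀ (l : List β) (s : List γ) (x : γ), x ∈ l.foldl step s ↔ x ∈ s ∨ ∃ i ∈ l, Add i x := by
  intro l
  induction l with
  | nil => simp
  | cons i l ih =>
    intro s x
    simp only [List.foldl_cons, ih, hstep, List.mem_cons]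
    constructor
    · rintro ((h | h) | ⟨j, hj, h⟩)
      · exact Or.inl h
      · exact Or.inr ⟨i, Or.inl rfl, h⟩
      · exact Or.inr ⟨j, Or.inr hj, h⟩
    · rintro (h | ⟨j, (rfl | hj), h⟩)
      · exact Or.inl (Or.inl h)
      · exact Or.inl (Or.inr h)
      · exact Or.inr ⟨j, hj, h⟩

lemma pv_mem_addIf (p : Prop) [Decidable p] (s : PySem.Set (Nat × Nat)) (x y : Nat × Nat) :
    y ∈ (if p then PySem.Set.add s x else s) ↔ y ∈ s ∨ (p ∧ y = x) := by
  split_ifs with h <;> simp [PySem.Set.mem_add, h]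

lemma mem_pvDisqStep (heightmap : List (List Int)) (rows cols : Nat)
    (s : PySem.Set (Nat × Nat)) (row col : Nat) (x : Nat × Nat) :
    x ∈ pvDisqStep heightmap rows cols s row col ↔
      x ∈ s ∨ pvCellAdd heightmap rows cols (row, col) x := by
  unfold pvDisqStep pvCellAdd
  by_cases h1 : col + 1 < cols <;> by_cases h2 : row + 1 < rows <;>
    simp only [h1, h2, if_true, if_false, pv_mem_addIf, true_and, false_and,
      or_false, false_or] <;> tauto

lemma mem_pvDisq (heightmap : List (List Int)) (rows cols : Nat) (x : Nat × Nat) :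
    x ∈ (List.range rows).foldl (fun disq row =>
          (List.range cols).foldl (fun disq col => pvDisqStep heightmap rows cols disq row col) disq)
          (PySem.Set.empty : PySem.Set (Nat × Nat)) ↔
      ∃ r < rows, ∃ c < cols, pvCellAdd heightmap rows cols (r, c) x := by
  rw [mem_foldl_step _ (fun row x => ∃ c < cols, pvCellAdd heightmap rows cols (row, c) x)]
  · simp [PySem.Set.empty]
  · intro s row x
    rw [mem_foldl_step _ (fun col x => pvCellAdd heightmap rows cols (row, col) x)]
    · simp
    · intro s col x
      exact mem_pvDisqStep heightmap rows cols s row col x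

lemma mem_pvDisq_iff (heightmap : List (List Int)) (rows cols r c : Nat)
    (hr : r < rows) (hc : c < cols) :
    (r, c) ∈ (List.range rows).foldl (fun disq row =>
          (List.range cols).foldl (fun disq col => pvDisqStep heightmap rows cols disq row col) disq)
          (PySem.Set.empty : PySem.Set (Nat × Nat)) ↔
      pvDisqP heightmap rows cols r c := by
  rw [mem_pvDisq]
  constructor
  · rintro ⟨r', hr', c', hc', h⟩
    rcases h with ⟨h1, ⟨h2, h3⟩ | ⟨h2, h3⟩⟩ | ⟨h1, ⟨h2, h3⟩ | ⟨h2, h3⟩⟩ <;>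
      simp only [Prod.mk.injEq] at h3 <;> obtain ⟨rfl, rfl⟩ := h3 <;> unfold pvDisqP
    · exact Or.inl ⟨h1, h2⟩
    · refine Or.inr (Or.inl ⟨by omega, ?_⟩)
      simpa using h2
    · exact Or.inr (Or.inr (Or.inl ⟨h1, h2⟩))
    · refine Or.inr (Or.inr (Or.inr ⟨by omega, ?_⟩))
      simpa using h2
  · rintro (⟨h1, h2⟩ | ⟨h1, h2⟩ | ⟨h1, h2⟩ | ⟨h1, h2⟩)
    · exact ⟨r, hr, c, hc, Or.inl ⟨h1, Or.inl ⟨h2, rfl⟩⟩⟩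
    · refine ⟨r, hr, c - 1, by omega, Or.inl ⟨by omega, Or.inr ⟨?_, ?_⟩⟩⟩
      · convert h2 using 2 <;> omega
      · ext <;> simp <;> omega
    · exact ⟨r, hr, c, hc, Or.inr ⟨h1, Or.inl ⟨h2, rfl⟩⟩⟩
    · refine ⟨r - 1, by omega, c, hc, Or.inr ⟨by omega, Or.inr ⟨?_, ?_⟩⟩⟩
      · convert h2 using 2 <;> omega
      · ext <;> simp <;> omega

lemma pvCell_natCast (heightmap : List (List Int)) (r c : Nat) :
    pvCell heightmap (r : Int) (c : Int) = pvCellN heightmap r c := by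
  simp [pvCell, pvCellN]

set_option maxHeartbeats 2000000 in
lemma allHigher_iff (hm : List (List Int)) (r c : Nat)
    (hr : r < hm.length) (hc : c < (hm.getD 0 []).length) :
    all_neighbours_are_higher (r : Int) (c : Int) hm = true ↔
      ¬ pvDisqP hm hm.length (hm.getD 0 []).length r c := by
  have e2 : 0 < r → pvCell hm ((r : Int) - 1) (c : Int) = pvCellN hm (r - 1) c := by
    intro h; rw [show ((r : Int) - 1) = (((r - 1 : Nat)) : Int) by omega]; exact pvCell_natCast ..
  have e3 : pvCell hm ((r : Int) + 1) (c : Int) = pvCellN hm (r + 1) c := by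
    rw [show ((r : Int) + 1) = (((r + 1 : Nat)) : Int) by omega]; exact pvCell_natCast ..
  have e4 : 0 < c → pvCell hm (r : Int) ((c : Int) - 1) = pvCellN hm r (c - 1) := by
    intro h; rw [show ((c : Int) - 1) = (((c - 1 : Nat)) : Int) by omega]; exact pvCell_natCast ..
  have e5 : pvCell hm (r : Int) ((c : Int) + 1) = pvCellN hm r (c + 1) := by
    rw [show ((c : Int) + 1) = (((c + 1 : Nat)) : Int) by omega]; exact pvCell_natCast ..
  unfold all_neighbours_are_higher pvDisqP
  simp only [List.filter_cons, List.filter_nil, List.all_eq_true,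
    Bool.and_eq_true, decide_eq_true_eq, Bool.not_eq_true', decide_eq_false_iff_not,
    PySem.List.pyGetD_zero]
  have b1 : (((0 ≤ (r : Int) - 1 ∧ (r : Int) - 1 < (hm.length : Int)) ∧ 0 ≤ (c : Int)) ∧
      (c : Int) < ((hm.getD 0 []).length : Int)) ↔ 0 < r := by omega
  have b2 : (((0 ≤ (r : Int) + 1 ∧ (r : Int) + 1 < (hm.length : Int)) ∧ 0 ≤ (c : Int)) ∧
      (c : Int) < ((hm.getD 0 []).length : Int)) ↔ r + 1 < hm.length := by omega
  have b3 : (((0 ≤ (r : Int) ∧ (r : Int) < (hm.length : Int)) ∧ 0 ≤ (c : Int) - 1) ∧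
      (c : Int) - 1 < ((hm.getD 0 []).length : Int)) ↔ 0 < c := by omega
  have b4 : (((0 ≤ (r : Int) ∧ (r : Int) < (hm.length : Int)) ∧ 0 ≤ (c : Int) + 1) ∧
      (c : Int) + 1 < ((hm.getD 0 []).length : Int)) ↔ c + 1 < (hm.getD 0 []).length := by omega
  simp only [b1, b2, b3, b4]
  by_cases h1 : 0 < r <;> by_cases h2 : r + 1 < hm.length <;> by_cases h3 : 0 < c <;>
    by_cases h4 : c + 1 < (hm.getD 0 []).length <;>
    simp [h1, h2, h3, e2, e3, e4, e5, pvCell_natCast] <;> tauto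

lemma gather_eq (heightmap : List (List Int)) :
    gather_heights heightmap = gather_heights_alt heightmap := by
  unfold gather_heights gather_heights_alt
  simp only [PySem.List.pyGetD_zero]
  apply PySem.List.foldl_congr_mem
  intro acc row hrow
  apply PySem.List.foldl_congr_mem
  intro acc2 col hcol
  rw [List.mem_range] at hrow hcol
  by_cases hd : (row, col) ∈ (List.range heightmap.length).foldl (fun disq row =>
      (List.range (heightmap.getD 0 []).length).foldl
        (fun disq col => pvDisqStep heightmap heightmap.length (heightmap.getD 0 []).length disq row col) disq)
      (PySem.Set.empty : PySem.Set (Nat × Nat))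
  · have hp : pvDisqP heightmap heightmap.length (heightmap.getD 0 []).length row col :=
      (mem_pvDisq_iff heightmap _ _ row col hrow hcol).mp hd
    rw [if_pos hd, if_neg]
    rw [allHigher_iff heightmap row col hrow hcol]
    simpa using hp
  · have hp := (mem_pvDisq_iff heightmap _ _ row col hrow hcol).not.mp hd
    rw [if_neg hd, if_pos ((allHigher_iff heightmap row col hrow hcol).mpr hp),
      pvCell_natCast]

-- ===== VERDICT (by name: the statement is the Claim_ definition above) =====
theorem gather_heights_spec : Claim_equal_gather_heights := by
  intro heightmap _ _
  show _ = _
  exact gather_eq heightmap
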